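-- pv_equiv track=rewrite | github.com/AntonBankevich/pacbio | py/disjointig_resolve/unique_marker.py | medianCoverage
-- ===== SOURCE A (Python) =====
-- def medianCoverage(covs):
--     total = sum(len(seg) for seg, cov in covs)
--     clen = 0
--     median_cov = 0
--     for seg, cov in sorted(covs, key=lambda cov: cov[1]):
--         clen += len(seg)
--         if clen * 2 >= total:
--             return cov
-- ===== SOURCE B (Python) =====
-- def medianCoverage(covs):
--     items = [(len(seg), cov) for seg, cov in covs]
--     if not items:
--         return None
--     total = sum(w for w, _ in items)
--     acc = 0
--     while True:
--         pivot = items[len(items) // 2][1]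
--         less = [it for it in items if it[1] < pivot]
--         wless = sum(w for w, _ in less)
--         if less and (acc + wless) * 2 >= total:
--             items = less
--         else:
--             weq = sum(w for w, c in items if c == pivot)
--             if (acc + wless + weq) * 2 >= total:
--                 return pivot
--             acc += wless + weq
--             items = [it for it in items if it[1] > pivot]
-- ===== Notes on version B (the rewrite author's own statement) =====
-- stated objective: alternative
-- what changed: Replaces sort-then-prefix-scan with a weighted quickselect: partition the (weight, coverage) pairs around a pivot coverage and recurse into the side that contains the weighted median, never sorting.
import Mathlib
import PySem

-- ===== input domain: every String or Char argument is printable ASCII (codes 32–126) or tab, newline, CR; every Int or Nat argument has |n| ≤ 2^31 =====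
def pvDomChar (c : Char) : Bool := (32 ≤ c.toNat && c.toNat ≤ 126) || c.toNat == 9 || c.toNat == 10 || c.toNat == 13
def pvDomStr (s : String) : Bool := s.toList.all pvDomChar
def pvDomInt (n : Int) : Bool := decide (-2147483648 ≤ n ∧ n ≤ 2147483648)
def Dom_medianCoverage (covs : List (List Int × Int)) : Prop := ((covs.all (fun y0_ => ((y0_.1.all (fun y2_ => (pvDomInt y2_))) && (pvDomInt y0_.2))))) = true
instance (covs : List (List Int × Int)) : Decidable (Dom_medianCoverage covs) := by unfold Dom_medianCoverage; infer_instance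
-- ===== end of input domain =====

-- B replaces A's sort-then-prefix-scan with a weighted quickselect (partition around a pivot
-- coverage and recurse into the side holding the weighted median); alternative algorithm, no sort.


-- ===== PORT A =====
-- the for-loop of A: accumulate clen, return cov once clen*2 >= total
def aLoop (total clen : Int) : List (List Int × Int) → Option Int
  | [] => none
  | (seg, cov) :: rest =>
    let clen' := clen + (seg.length : Int)
    if total ≤ clen' * 2 then some cov else aLoop total clen' rest

def medianCoverage (covs : List (List Int × Int)) : Option Int :=
  let total : Int := (covs.map (fun p => ((p.1.length : Int)))).sum
  aLoop total 0 (PySem.List.sorted covs (fun p => p.2) false)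

-- ===== PORT B =====
-- the while-loop of B (quickselect on (weight, coverage) pairs); Python's `while True` never
-- sees an empty list, so the [] base case here is unreachable from medianCoverage_alt
def bLoop (total acc : Int) (items : List (Int × Int)) : Option Int :=
  if hne : items = [] then none
  else
    let pivot := (items.getD (items.length / 2) (0, 0)).2
    let less := items.filter (fun it => it.2 < pivot)
    let wless := (less.map (fun it => it.1)).sum
    if less ≠ [] ∧ total ≤ (acc + wless) * 2 then bLoop total acc less
    else
      let weq := ((items.filter (fun it => it.2 == pivot)).map (fun it => it.1)).sum
      if total ≤ (acc + wless + weq) * 2 then some pivot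
      else bLoop total (acc + wless + weq) (items.filter (fun it => pivot < it.2))
  termination_by items.length
  decreasing_by
    all_goals
      have hlen : 0 < items.length := List.length_pos_iff.mpr hne
      have hlt : items.length / 2 < items.length := by omega
      simp only [List.length_unattach]
      refine lt_of_lt_of_eq ?_ (List.length_attach (l := items))
      refine List.length_filter_lt_length_iff_exists.mpr
        ⟨⟨items[items.length / 2], List.getElem_mem hlt⟩, List.mem_attach _ _, ?_⟩
      simp [List.getD, List.getElem?_eq_getElem hlt]

def medianCoverage_alt (covs : List (List Int × Int)) : Option Int :=
  let items := covs.map (fun p => (((p.1.length : Int)), p.2))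
  if items = [] then none
  else
    let total := (items.map (fun it => it.1)).sum
    bLoop total 0 items

-- ===== PRECONDITION & SPEC =====
def Spec_medianCoverage (covs : List (List Int × Int)) (out : Option Int) : Prop := out = medianCoverage_alt covs
instance (covs : List (List Int × Int)) (out : Option Int) : Decidable (Spec_medianCoverage covs out) := by unfold Spec_medianCoverage; infer_instance

-- ===== CLAIM (what is proved, stated in full; the proofs are below) =====
def Claim_equal_medianCoverage : Prop := ∀ (covs : List (List Int × Int)), Dom_medianCoverage covs → Spec_medianCoverage covs (medianCoverage covs)

-- ===== LEMMAS AND PROOFS =====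

-- total weight of a list of (weight, value) pairs
def S (l : List (Int × Int)) : Int := (l.map (fun it => it.1)).sum

-- weight of the elements with value ≤ v
def Wle (l : List (Int × Int)) (v : Int) : Int := S (l.filter (fun it => it.2 ≤ v))

-- "v is the least value in l whose cumulative weight (offset by acc) reaches half of total"
def MinAt (total acc : Int) (l : List (Int × Int)) (v : Int) : Prop :=
  v ∈ l.map (fun it => it.2) ∧ total ≤ 2 * (acc + Wle l v) ∧
    ∀ u ∈ l.map (fun it => it.2), total ≤ 2 * (acc + Wle l u) → v ≤ u

-- A's loop re-expressed over (weight, value) pairs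
def scanW (total clen : Int) : List (Int × Int) → Option Int
  | [] => none
  | (w, v) :: rest =>
    let clen' := clen + w
    if total ≤ clen' * 2 then some v else scanW total clen' rest

theorem aLoop_eq_scanW (total clen : Int) (l : List (List Int × Int)) :
    aLoop total clen l = scanW total clen (l.map (fun p => (((p.1.length : Int)), p.2))) := by
  induction l generalizing clen with
  | nil => rfl
  | cons h t ih => simp only [aLoop, scanW, List.map_cons]; split <;> simp [ih]

theorem MinAt_unique {total acc : Int} {l : List (Int × Int)} {v v' : Int}
    (h : MinAt total acc l v) (h' : MinAt total acc l v') : v = v' :=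
  le_antisymm (h.2.2 v' h'.1 h'.2.1) (h'.2.2 v h.1 h.2.1)

theorem S_perm {l l' : List (Int × Int)} (h : l.Perm l') : S l = S l' :=
  (h.map _).sum_eq

theorem Wle_perm {l l' : List (Int × Int)} (h : l.Perm l') (v : Int) : Wle l v = Wle l' v :=
  S_perm (h.filter _)

theorem MinAt_perm {total acc : Int} {l l' : List (Int × Int)} (h : l.Perm l') {v : Int} :
    MinAt total acc l v → MinAt total acc l' v := by
  rintro ⟨h1, h2, h3⟩
  refine ⟨(h.map _).mem_iff.mp h1, (Wle_perm h v) ▸ h2, ?_⟩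
  intro u hu hc
  exact h3 u ((h.map _).mem_iff.mpr hu) ((Wle_perm h u) ▸ hc)

theorem S_nonneg {l : List (Int × Int)} (hn : ∀ x ∈ l, 0 ≤ x.1) : 0 ≤ S l := by
  induction l with
  | nil => simp [S]
  | cons h t ih =>
    have h0 := hn h (by simp)
    have iht := ih (fun x hx => hn x (by simp [hx]))
    simp only [S, List.map_cons, List.sum_cons] at *
    omega

theorem Wle_nonneg {l : List (Int × Int)} (hn : ∀ x ∈ l, 0 ≤ x.1) (v : Int) : 0 ≤ Wle l v :=
  S_nonneg (fun x hx => hn x (List.mem_of_mem_filter hx))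

theorem S_filter_le {l : List (Int × Int)} (hn : ∀ x ∈ l, 0 ≤ x.1) (p : Int × Int → Bool) :
    S (l.filter p) ≤ S l := by
  induction l with
  | nil => simp [S]
  | cons h t ih =>
    have h0 := hn h (by simp)
    have iht := ih (fun x hx => hn x (by simp [hx]))
    by_cases hp : p h = true <;> simp [S, List.filter_cons, hp] at * <;> omega

theorem Wle_mono {l : List (Int × Int)} (hn : ∀ x ∈ l, 0 ≤ x.1) {u v : Int} (huv : u ≤ v) :
    Wle l u ≤ Wle l v := by
  induction l with
  | nil => simp [Wle, S]
  | cons h t ih =>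
    have h0 := hn h (by simp)
    have iht := ih (fun x hx => hn x (by simp [hx]))
    by_cases h1 : h.2 ≤ u
    · have h2 : (decide (h.2 ≤ u)) = true := by simp; omega
      have h3 : (decide (h.2 ≤ v)) = true := by simp; omega
      simp [Wle, S, List.filter_cons, h2, h3] at *; omega
    · have h2 : (decide (h.2 ≤ u)) = false := by simp; omega
      by_cases h3 : h.2 ≤ v
      · have h4 : (decide (h.2 ≤ v)) = true := by simp; omega
        simp [Wle, S, List.filter_cons, h2, h4] at *; omega
      · have h4 : (decide (h.2 ≤ v)) = false := by simp; omega
        simp [Wle, S, List.filter_cons, h2, h4] at *; omega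

-- partition of the total weight by comparison with a pivot p
theorem S_partition (l : List (Int × Int)) (p : Int) :
    S l = S (l.filter (fun it => it.2 < p)) + S (l.filter (fun it => it.2 == p))
          + S (l.filter (fun it => p < it.2)) := by
  induction l with
  | nil => simp [S]
  | cons h t ih =>
    rcases lt_trichotomy h.2 p with hc | hc | hc
    · have h1 : (decide (h.2 < p)) = true := by simp; omega
      have h2 : (h.2 == p) = false := by simp; omega
      have h3 : (decide (p < h.2)) = false := by simp; omega
      simp [List.filter_cons, h1, h2, h3, S] at *; omega
    · have h1 : (decide (h.2 < p)) = false := by simp; omega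
      have h2 : (h.2 == p) = true := by simp [hc]
      have h3 : (decide (p < h.2)) = false := by simp; omega
      simp [List.filter_cons, h1, h2, h3, S] at *; omega
    · have h1 : (decide (h.2 < p)) = false := by simp; omega
      have h2 : (h.2 == p) = false := by simp; omega
      have h3 : (decide (p < h.2)) = true := by simp; omega
      simp [List.filter_cons, h1, h2, h3, S] at *; omega

-- at a value below the pivot, Wle only sees the "less" part
theorem Wle_lt_pivot (l : List (Int × Int)) {p v : Int} (hv : v < p) :
    Wle l v = Wle (l.filter (fun it => it.2 < p)) v := by
  induction l with
  | nil => rfl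
  | cons h t ih =>
    by_cases h1 : h.2 ≤ v
    · have h2 : (decide (h.2 ≤ v)) = true := by simp; omega
      have h3 : (decide (h.2 < p)) = true := by simp; omega
      simp [Wle, S, List.filter_cons, h2, h3] at *; omega
    · have h2 : (decide (h.2 ≤ v)) = false := by simp; omega
      by_cases h3 : h.2 < p
      · have h4 : (decide (h.2 < p)) = true := by simp; omega
        simp [Wle, S, List.filter_cons, h2, h4] at *; omega
      · have h4 : (decide (h.2 < p)) = false := by simp; omega
        simp [Wle, S, List.filter_cons, h2, h4] at *; omega

-- Wle at the pivot = weight(less) + weight(eq)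
theorem Wle_at_pivot (l : List (Int × Int)) (p : Int) :
    Wle l p = S (l.filter (fun it => it.2 < p)) + S (l.filter (fun it => it.2 == p)) := by
  induction l with
  | nil => simp [Wle, S]
  | cons h t ih =>
    rcases lt_trichotomy h.2 p with hc | hc | hc
    · have h1 : (decide (h.2 ≤ p)) = true := by simp; omega
      have h2 : (decide (h.2 < p)) = true := by simp; omega
      have h3 : (h.2 == p) = false := by simp; omega
      simp [Wle, S, List.filter_cons, h1, h2, h3] at *; omega
    · have h1 : (decide (h.2 ≤ p)) = true := by simp; omega
      have h2 : (decide (h.2 < p)) = false := by simp; omega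
      have h3 : (h.2 == p) = true := by simp [hc]
      simp [Wle, S, List.filter_cons, h1, h2, h3] at *; omega
    · have h1 : (decide (h.2 ≤ p)) = false := by simp; omega
      have h2 : (decide (h.2 < p)) = false := by simp; omega
      have h3 : (h.2 == p) = false := by simp; omega
      simp [Wle, S, List.filter_cons, h1, h2, h3] at *; omega

-- at a value above the pivot, Wle = weight(less) + weight(eq) + Wle(greater)
theorem Wle_gt_pivot (l : List (Int × Int)) {p v : Int} (hv : p < v) :
    Wle l v = S (l.filter (fun it => it.2 < p)) + S (l.filter (fun it => it.2 == p))
              + Wle (l.filter (fun it => p < it.2)) v := by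
  induction l with
  | nil => simp [Wle, S]
  | cons h t ih =>
    rcases lt_trichotomy h.2 p with hc | hc | hc
    · have h1 : (decide (h.2 ≤ v)) = true := by simp; omega
      have h2 : (decide (h.2 < p)) = true := by simp; omega
      have h3 : (h.2 == p) = false := by simp; omega
      have h4 : (decide (p < h.2)) = false := by simp; omega
      simp [Wle, S, List.filter_cons, h1, h2, h3, h4] at *; omega
    · have h1 : (decide (h.2 ≤ v)) = true := by simp; omega
      have h2 : (decide (h.2 < p)) = false := by simp; omega
      have h3 : (h.2 == p) = true := by simp [hc]
      have h4 : (decide (p < h.2)) = false := by simp; omega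
      simp [Wle, S, List.filter_cons, h1, h2, h3, h4] at *; omega
    · have h2 : (decide (h.2 < p)) = false := by simp; omega
      have h3 : (h.2 == p) = false := by simp; omega
      have h4 : (decide (p < h.2)) = true := by simp; omega
      by_cases h1 : h.2 ≤ v
      · have h5 : (decide (h.2 ≤ v)) = true := by simp; omega
        simp [Wle, S, List.filter_cons, h5, h2, h3, h4] at *; omega
      · have h5 : (decide (h.2 ≤ v)) = false := by simp; omega
        simp [Wle, S, List.filter_cons, h5, h2, h3, h4] at *; omega

theorem Wle_cons_le {h : Int × Int} {t : List (Int × Int)} {v : Int} (hv : h.2 ≤ v) :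
    Wle (h :: t) v = h.1 + Wle t v := by
  have h1 : (decide (h.2 ≤ v)) = true := by simp; omega
  simp [Wle, S, List.filter_cons, h1]

-- A's scan over a sorted list computes the weighted-median value
theorem scanW_minAt {total : Int} :
    ∀ (l : List (Int × Int)), l ≠ [] →
      l.Pairwise (fun a b => a.2 ≤ b.2) → (∀ x ∈ l, 0 ≤ x.1) →
      ∀ clen : Int, total ≤ 2 * (clen + S l) →
      ∃ v, scanW total clen l = some v ∧ MinAt total clen l v := by
  intro l
  induction l with
  | nil => intro h; exact absurd rfl h
  | cons hd t ih =>
    intro _ hpw hnn clen htot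
    have hhead : ∀ b ∈ t, hd.2 ≤ b.2 := (List.pairwise_cons.mp hpw).1
    have hpwt : t.Pairwise (fun a b => a.2 ≤ b.2) := (List.pairwise_cons.mp hpw).2
    have hnnt : ∀ x ∈ t, 0 ≤ x.1 := fun x hx => hnn x (by simp [hx])
    have hnnh : 0 ≤ hd.1 := hnn hd (by simp)
    have hscan : scanW total clen (hd :: t)
        = if total ≤ (clen + hd.1) * 2 then some hd.2 else scanW total (clen + hd.1) t := by
      rcases hd with ⟨w, v⟩; rfl
    by_cases hcond : total ≤ (clen + hd.1) * 2
    · refine ⟨hd.2, by rw [hscan, if_pos hcond], by simp, ?_, ?_⟩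
      · have h1 := Wle_nonneg hnnt hd.2
        rw [Wle_cons_le (le_refl hd.2)]; omega
      · intro u hu _
        rcases List.mem_map.mp hu with ⟨x, hx, rfl⟩
        rcases List.mem_cons.mp hx with rfl | hx'
        · exact le_refl _
        · exact hhead x hx'
    · have hSl : S (hd :: t) = hd.1 + S t := by simp [S]
      have htne : t ≠ [] := by
        rintro rfl
        simp [S] at hSl htot
        omega
      obtain ⟨v, hsc, hmem, hcnd, hmin⟩ :=
        ih htne hpwt hnnt (clen + hd.1) (by rw [hSl] at htot; omega)
      have hhv : hd.2 ≤ v := by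
        rcases List.mem_map.mp hmem with ⟨x, hx, rfl⟩; exact hhead x hx
      refine ⟨v, by rw [hscan, if_neg hcond]; exact hsc,
        by simp only [List.map_cons]; exact List.mem_cons_of_mem _ hmem, ?_, ?_⟩
      · rw [Wle_cons_le hhv]; omega
      · intro u hu hcu
        rcases List.mem_map.mp hu with ⟨x, hx, rfl⟩
        rcases List.mem_cons.mp hx with rfl | hx'
        · -- u is the head value
          rw [Wle_cons_le (le_refl x.2)] at hcu
          by_cases hxm : x.2 ∈ t.map (fun it => it.2)
          · exact hmin x.2 hxm (by omega)
          · have hfe : t.filter (fun it => it.2 ≤ x.2) = [] := by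
              refine List.filter_eq_nil_iff.mpr ?_
              intro b hb
              have h1 := hhead b hb
              have h2 : b.2 ≠ x.2 := fun he => hxm (List.mem_map.mpr ⟨b, hb, he⟩)
              simp; omega
            have : Wle t x.2 = 0 := by simp [Wle, hfe, S]
            omega
        · exact hmin x.2 (List.mem_map.mpr ⟨x, hx', rfl⟩)
            (by rw [Wle_cons_le (hhead x hx')] at hcu; omega)

-- B's quickselect loop computes the weighted-median value
theorem bLoop_minAt {total : Int} :
    ∀ (n : Nat) (l : List (Int × Int)), l.length ≤ n → l ≠ [] →
      (∀ x ∈ l, 0 ≤ x.1) →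
      ∀ acc : Int, total ≤ 2 * (acc + S l) →
      ∃ v, bLoop total acc l = some v ∧ MinAt total acc l v := by
  intro n
  induction n with
  | zero => intro l hl hne _ _ _; exact absurd (List.length_eq_zero_iff.mp (by omega)) hne
  | succ n ih =>
    intro l hl hne hnn acc htot
    have hlen : 0 < l.length := List.length_pos_iff.mpr hne
    have hlt : l.length / 2 < l.length := by omega
    set pivot := (l.getD (l.length / 2) (0, 0)).2 with hpiv
    have hpivmem : pivot ∈ l.map (fun it => it.2) := by
      rw [hpiv, List.getD_eq_getElem _ _ hlt]
      exact List.mem_map.mpr ⟨_, List.getElem_mem hlt, rfl⟩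
    set less := l.filter (fun it => it.2 < pivot) with hless
    set wless := (less.map (fun it => it.1)).sum with hwless
    have hwlessS : wless = S less := rfl
    set weq := ((l.filter (fun it => it.2 == pivot)).map (fun it => it.1)).sum with hweq
    have hweqS : weq = S (l.filter (fun it => it.2 == pivot)) := rfl
    set greater := l.filter (fun it => pivot < it.2) with hgreater
    have hlesslen : less.length < l.length := by
      refine List.length_filter_lt_length_iff_exists.mpr
        ⟨l.getD (l.length / 2) (0, 0), ?_, by simp [hpiv]⟩
      rw [List.getD_eq_getElem _ _ hlt]; exact List.getElem_mem hlt
    have hgreatlen : greater.length < l.length := by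
      refine List.length_filter_lt_length_iff_exists.mpr
        ⟨l.getD (l.length / 2) (0, 0), ?_, by simp [hpiv]⟩
      rw [List.getD_eq_getElem _ _ hlt]; exact List.getElem_mem hlt
    have hnnless : ∀ x ∈ less, 0 ≤ x.1 := fun x hx => hnn x (List.mem_of_mem_filter hx)
    have hnngreat : ∀ x ∈ greater, 0 ≤ x.1 := fun x hx => hnn x (List.mem_of_mem_filter hx)
    have hunfold : bLoop total acc l
        = if less ≠ [] ∧ total ≤ (acc + wless) * 2 then bLoop total acc less
          else if total ≤ (acc + wless + weq) * 2 then some pivot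
          else bLoop total (acc + wless + weq) greater := by
      rw [bLoop, dif_neg hne]
    have hpart : S l = wless + weq + S greater := by
      rw [hwlessS, hweqS, hless, hgreater]; exact S_partition l pivot
    by_cases hb1 : less ≠ [] ∧ total ≤ (acc + wless) * 2
    · -- recurse into "less"
      obtain ⟨v, hrec, hmem, hcnd, hmin⟩ :=
        ih less (by omega) hb1.1 hnnless acc (by rw [hwlessS] at hb1; omega)
      have hvp : v < pivot := by
        rcases List.mem_map.mp hmem with ⟨x, hx, rfl⟩
        rw [hless] at hx
        have := (List.mem_filter.mp hx).2
        simpa using this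
      refine ⟨v, by rw [hunfold, if_pos hb1]; exact hrec, ?_, ?_, ?_⟩
      · rcases List.mem_map.mp hmem with ⟨x, hx, rfl⟩
        exact List.mem_map.mpr ⟨x, List.mem_of_mem_filter (by rw [← hless]; exact hx), rfl⟩
      · rw [show Wle l v = Wle less v from by rw [hless]; exact Wle_lt_pivot l hvp]
        exact hcnd
      · intro u hu hcu
        by_cases hup : u < pivot
        · rcases List.mem_map.mp hu with ⟨x, hx, rfl⟩
          have hxless : x ∈ less := by
            rw [hless]; exact List.mem_filter.mpr ⟨hx, by simp; omega⟩
          refine hmin x.2 (List.mem_map.mpr ⟨x, hxless, rfl⟩) ?_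
          rw [show Wle less x.2 = Wle l x.2 from by rw [hless]; exact (Wle_lt_pivot l hup).symm]
          exact hcu
        · omega
    · -- "less" side does not reach half
      by_cases hb2 : total ≤ (acc + wless + weq) * 2
      · -- pivot is the answer
        refine ⟨pivot, by rw [hunfold, if_neg hb1, if_pos hb2], hpivmem, ?_, ?_⟩
        · rw [show Wle l pivot = wless + weq from by
            rw [hwlessS, hweqS, hless]; exact Wle_at_pivot l pivot]
          omega
        · intro u hu hcu
          by_contra hnp
          have hup : u < pivot := by omega
          rcases List.mem_map.mp hu with ⟨x, hx, rfl⟩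
          have hxless : x ∈ less := by
            rw [hless]; exact List.mem_filter.mpr ⟨hx, by simp; omega⟩
          have h1 : Wle l x.2 = Wle less x.2 := by rw [hless]; exact Wle_lt_pivot l hup
          have h2 : Wle less x.2 ≤ S less := by
            rw [Wle]; exact S_filter_le hnnless _
          have hlne : less ≠ [] := fun he => by rw [he] at hxless; exact absurd hxless (by simp)
          rw [hwlessS] at hb1
          exact hb1 ⟨hlne, by omega⟩
      · -- recurse into "greater"
        have hgne : greater ≠ [] := by
          intro he
          have : S greater = 0 := by rw [he]; rfl
          omega
        obtain ⟨v, hrec, hmem, hcnd, hmin⟩ :=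
          ih greater (by omega) hgne hnngreat (acc + wless + weq) (by omega)
        have hvp : pivot < v := by
          rcases List.mem_map.mp hmem with ⟨x, hx, rfl⟩
          rw [hgreater] at hx
          have := (List.mem_filter.mp hx).2
          simpa using this
        have hWgt : ∀ u : Int, pivot < u → Wle l u = wless + weq + Wle greater u := by
          intro u hu
          rw [hwlessS, hweqS, hless, hgreater]; exact Wle_gt_pivot l hu
        refine ⟨v, by rw [hunfold, if_neg hb1, if_neg hb2]; exact hrec, ?_, ?_, ?_⟩
        · rcases List.mem_map.mp hmem with ⟨x, hx, rfl⟩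
          exact List.mem_map.mpr ⟨x, List.mem_of_mem_filter (by rw [← hgreater]; exact hx), rfl⟩
        · rw [hWgt v hvp]; omega
        · intro u hu hcu
          by_cases hup : pivot < u
          · rcases List.mem_map.mp hu with ⟨x, hx, rfl⟩
            have hxg : x ∈ greater := by
              rw [hgreater]; exact List.mem_filter.mpr ⟨hx, by simp; omega⟩
            refine hmin x.2 (List.mem_map.mpr ⟨x, hxg, rfl⟩) ?_
            rw [hWgt x.2 hup] at hcu; omega
          · exfalso
            have h1 : Wle l u ≤ Wle l pivot := Wle_mono hnn (by omega)
            have h2 : Wle l pivot = wless + weq := by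
              rw [hwlessS, hweqS, hless]; exact Wle_at_pivot l pivot
            omega

-- ===== VERDICT (by name: the statement is the Claim_ definition above) =====
theorem medianCoverage_spec : Claim_equal_medianCoverage := by
  intro covs _
  unfold Spec_medianCoverage medianCoverage medianCoverage_alt
  by_cases hc : covs = []
  · subst hc; decide
  · set w := covs.map (fun p => (((p.1.length : Int)), p.2)) with hw
    set sc := PySem.List.sorted covs (fun p => p.2) false with hsc
    set lw := sc.map (fun p => (((p.1.length : Int)), p.2)) with hlw
    have hwne : w ≠ [] := by simp [hw, hc]
    have hscperm : sc.Perm covs := PySem.List.sorted_perm covs _ false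
    have hperm : lw.Perm w := hscperm.map _
    have hlwne : lw ≠ [] := by
      simp [hlw, hsc, PySem.List.sorted_eq_nil_iff, hc]
    have hpair : lw.Pairwise (fun a b => a.2 ≤ b.2) := by
      rw [hlw]
      exact List.pairwise_map.mpr (by simpa using PySem.List.sorted_pairwise covs (fun p => p.2))
    have hnnw : ∀ x ∈ w, 0 ≤ x.1 := by
      intro x hx
      rcases List.mem_map.mp hx with ⟨p, _, rfl⟩
      exact Int.natCast_nonneg _
    have hnnlw : ∀ x ∈ lw, 0 ≤ x.1 := fun x hx => hnnw x (hperm.mem_iff.mp hx)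
    have htotA : (covs.map (fun p => ((p.1.length : Int)))).sum = S w := by
      simp [hw, S, List.map_map]; rfl
    have htotB : (w.map (fun it => it.1)).sum = S w := rfl
    have hSlw : S lw = S w := S_perm hperm
    have hSnn : 0 ≤ S w := S_nonneg hnnw
    obtain ⟨vA, hA, hminA⟩ :=
      scanW_minAt (total := S w) lw hlwne hpair hnnlw 0 (by omega)
    obtain ⟨vB, hB, hminB⟩ :=
      bLoop_minAt (total := S w) w.length w le_rfl hwne hnnw 0 (by omega)
    have hAB : vA = vB := MinAt_unique (MinAt_perm hperm hminA) hminB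
    rw [if_neg hwne, aLoop_eq_scanW, htotA]
    show scanW (S w) 0 lw = bLoop ((List.map (fun it => it.1) w).sum) 0 w
    rw [htotB, hA, hB, hAB]
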